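-- pv_equiv track=rewrite | github.com/Iliyan-H-Iliev/Python | Advanced/Matrix/Funk_rotate_matrix.py | rotate_matrix_left
-- ===== SOURCE A (Python) =====
-- def rotate_matrix_left(matrix_l, times):
--     r = len(matrix_l)
--
--     for _ in range(times):
--         new_matrix = [list("*" * r) for _ in range(r)]
--         for i in range(r):
--             for j in range(r):
--                 el = matrix_l[i][j]
--                 new_matrix[r - 1 - j][i] = el
--         matrix_l = new_matrix.copy()
--     return matrix_l
-- ===== SOURCE B (Python) =====
-- def rotate_matrix_left(matrix_l, times):
--     if times <= 0:
--         return matrix_l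
--     m = matrix_l
--     for _ in range(times % 4):
--         m = [list(row) for row in zip(*m)][::-1]
--     return m
-- ===== Notes on version B (the rewrite author's own statement) =====
-- stated objective: faster
-- what changed: B reduces the rotation count modulo 4 and performs at most 3 rotations, each done as reversed-transpose (zip) instead of A's cell-by-cell writes into a fresh star-filled matrix.
-- outside the precondition, e.g. on rotate_matrix_left([['a', 'b']], 1): A returns [['a']], B returns [['b'], ['a']]
import Mathlib
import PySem

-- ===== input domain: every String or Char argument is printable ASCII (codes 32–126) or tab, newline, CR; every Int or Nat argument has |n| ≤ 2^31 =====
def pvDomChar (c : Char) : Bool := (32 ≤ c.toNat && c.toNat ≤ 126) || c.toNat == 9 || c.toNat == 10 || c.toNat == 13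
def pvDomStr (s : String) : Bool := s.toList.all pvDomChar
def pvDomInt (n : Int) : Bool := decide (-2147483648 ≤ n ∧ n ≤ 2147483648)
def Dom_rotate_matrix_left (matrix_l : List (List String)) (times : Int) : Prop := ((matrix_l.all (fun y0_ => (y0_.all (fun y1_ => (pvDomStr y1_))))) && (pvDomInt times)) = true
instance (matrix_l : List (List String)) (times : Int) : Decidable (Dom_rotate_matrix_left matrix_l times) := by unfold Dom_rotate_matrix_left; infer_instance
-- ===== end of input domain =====

-- B replaces A's `times`-fold cell-by-cell rebuild by at most (times % 4) rotations, each a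
-- reversed transpose (zip) — asymptotically faster in `times`.

-- ===== PORT A =====
-- new_matrix[a][b] = el  (both indices are in range whenever the Python does not raise)
def pvSetCell (nm : List (List String)) (a b : Nat) (el : String) : List (List String) :=
  nm.set a ((nm.getD a []).set b el)

-- one iteration of A's outer loop body; r = len(matrix_l), computed once before the loop
def pvRotA (m : List (List String)) (r : Nat) : List (List String) :=
  (List.range r).foldl (fun nm i =>
    (List.range r).foldl (fun nm j =>
      pvSetCell nm (r - 1 - j) i (PySem.List.pyGetD (PySem.List.pyGetD m (i : Int) []) (j : Int) ""))
      nm)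
    (List.replicate r (List.replicate r "*"))

def rotate_matrix_left (matrix_l : List (List String)) (times : Int) : List (List String) :=
  (PySem.List.pyRange 0 times 1).foldl (fun m _ => pvRotA m matrix_l.length) matrix_l

-- ===== PORT B =====
-- zip(*m): truncates at the first empty row; zip() of no rows is empty
def pvZipStar (m : List (List String)) : List (List String) :=
  if h : m = [] ∨ m.any (fun row => row.isEmpty) then []
  else (m.map (fun row => row.headD "")) :: pvZipStar (m.map (fun row => row.tail))
termination_by (m.map List.length).sum
decreasing_by
  simp only [not_or] at h
  obtain ⟨h1, h2⟩ := h
  have hnil : [] ∉ m := by simpa using h2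
  have hle : ∀ x ∈ m.attach, (List.length ∘ fun (x : {x // x ∈ m}) => (↑x : List String).tail) x ≤
      (fun (x : {x // x ∈ m}) => (↑x : List String).length) x := by
    intro x _
    simp only [Function.comp, List.length_tail]
    omega
  have hlt : ∃ x ∈ m.attach, (List.length ∘ fun (x : {x // x ∈ m}) => (↑x : List String).tail) x <
      (fun (x : {x // x ∈ m}) => (↑x : List String).length) x := by
    obtain ⟨row, hrow⟩ := List.exists_mem_of_ne_nil m h1
    refine ⟨⟨row, hrow⟩, List.mem_attach _ _, ?_⟩
    have hpos : 0 < row.length := List.length_pos_iff.mpr (fun e => hnil (e ▸ hrow))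
    simp only [Function.comp, List.length_tail]
    omega
  have hmain := List.sum_lt_sum _ _ hle hlt
  rw [List.map_map]
  calc (m.attach.map (List.length ∘ fun (x : {x // x ∈ m}) => (↑x : List String).tail)).sum
      < (m.attach.map (fun (x : {x // x ∈ m}) => (↑x : List String).length)).sum := hmain
    _ = (m.map List.length).sum := by simp

-- m = [list(row) for row in zip(*m)][::-1]; [::-1] is reverse (PySem.List.slice?_none_none_neg_one),
-- and list(row) on a tuple of strings is the row itself
def rotate_matrix_left_alt (matrix_l : List (List String)) (times : Int) : List (List String) :=
  if times ≤ 0 then matrix_l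
  else (PySem.List.pyRange 0 (PySem.Int.mod times 4) 1).foldl
        (fun m _ => (pvZipStar m).reverse) matrix_l

-- ===== PRECONDITION & SPEC =====
-- Pre_ excludes non-square matrices when times > 0: rows shorter than len(matrix_l) make A raise
-- IndexError, and on rows longer than len(matrix_l) A silently drops the extra columns, an artefact
-- of its fixed r×r target matrix.  (With times ≤ 0 A touches nothing, so any matrix is admitted.)
def Pre_rotate_matrix_left (matrix_l : List (List String)) (times : Int) : Prop :=
  times ≤ 0 ∨ ∀ row ∈ matrix_l, row.length = matrix_l.length
instance (matrix_l : List (List String)) (times : Int) : Decidable (Pre_rotate_matrix_left matrix_l times) := by unfold Pre_rotate_matrix_left; infer_instance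

def pvWitness_rotate_matrix_left : List (List String) × Int := ([["a", "b"], ["c", "d"]], 1)

def Spec_rotate_matrix_left (matrix_l : List (List String)) (times : Int) (out : List (List String)) : Prop := out = rotate_matrix_left_alt matrix_l times
instance (matrix_l : List (List String)) (times : Int) (out : List (List String)) : Decidable (Spec_rotate_matrix_left matrix_l times out) := by unfold Spec_rotate_matrix_left; infer_instance

-- ===== CLAIM (what is proved, stated in full; the proofs are below) =====
def Claim_equal_rotate_matrix_left : Prop := ∀ (matrix_l : List (List String)) (times : Int), Dom_rotate_matrix_left matrix_l times → Pre_rotate_matrix_left matrix_l times → Spec_rotate_matrix_left matrix_l times (rotate_matrix_left matrix_l times)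

-- ===== LEMMAS AND PROOFS =====

-- nm[a][b] with defaults, and the r×r shape invariant
def pvCell (nm : List (List String)) (a b : Nat) : String := (nm.getD a []).getD b ""

def pvShape (r : Nat) (nm : List (List String)) : Prop :=
  nm.length = r ∧ ∀ row ∈ nm, row.length = r

-- the common mathematical description of one left rotation
def pvRotSpec (m : List (List String)) : List (List String) :=
  (List.range m.length).map (fun a => m.map (fun row => row.getD (m.length - 1 - a) ""))

theorem pvGetD_zero (l : List String) (d : String) : l.getD 0 d = l.headD d := by
  cases l <;> rfl

theorem pvGetD_tail (l : List String) (d : String) (j : Nat) :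
    l.tail.getD j d = l.getD (j + 1) d := by cases l <;> rfl

theorem pvShape_set {r : Nat} {nm : List (List String)} (h : pvShape r nm)
    {a b : Nat} (ha : a < r) (el : String) : pvShape r (pvSetCell nm a b el) := by
  obtain ⟨hlen, hrows⟩ := h
  refine ⟨by simp [pvSetCell, hlen], ?_⟩
  intro row hrow
  rcases List.mem_or_eq_of_mem_set hrow with h1 | h1
  · exact hrows _ h1
  · subst h1
    rw [List.length_set, List.getD_eq_getElem _ _ (by omega)]
    exact hrows _ (List.getElem_mem (by omega))

theorem pvGetD_set_row (nm : List (List String)) (a a' : Nat) (row : List String)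
    (ha : a < nm.length) :
    (nm.set a row).getD a' [] = if a' = a then row else nm.getD a' [] := by
  by_cases h1 : a' = a
  · subst h1
    rw [if_pos rfl, List.getD_eq_getElem _ _ (by simpa using ha)]
    simp
  · rw [if_neg h1]
    by_cases h2 : a' < nm.length
    · rw [List.getD_eq_getElem _ _ (by simpa using h2), List.getD_eq_getElem _ _ h2,
          List.getElem_set_ne (by omega)]
    · rw [List.getD_eq_default _ _ (by simpa using h2), List.getD_eq_default _ _ (by omega)]

theorem pvGetD_set_str (l : List String) (b b' : Nat) (el : String) (hb : b < l.length) :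
    (l.set b el).getD b' "" = if b' = b then el else l.getD b' "" := by
  by_cases h1 : b' = b
  · subst h1
    rw [if_pos rfl, List.getD_eq_getElem _ _ (by simpa using hb)]
    simp
  · rw [if_neg h1]
    by_cases h2 : b' < l.length
    · rw [List.getD_eq_getElem _ _ (by simpa using h2), List.getD_eq_getElem _ _ h2,
          List.getElem_set_ne (by omega)]
    · rw [List.getD_eq_default _ _ (by simpa using h2), List.getD_eq_default _ _ (by omega)]

theorem pvCell_set {r : Nat} {nm : List (List String)} (h : pvShape r nm)
    {a b : Nat} (ha : a < r) (hb : b < r) (el : String) (a' b' : Nat) :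
    pvCell (pvSetCell nm a b el) a' b' =
      if a' = a ∧ b' = b then el else pvCell nm a' b' := by
  obtain ⟨hlen, hrows⟩ := h
  have ha' : a < nm.length := by omega
  have harow : (nm.getD a []).length = r := by
    rw [List.getD_eq_getElem _ _ ha']
    exact hrows _ (List.getElem_mem ha')
  unfold pvCell pvSetCell
  rw [pvGetD_set_row nm a a' _ ha']
  by_cases h1 : a' = a
  · subst h1
    rw [if_pos rfl, pvGetD_set_str _ _ _ _ (harow ▸ hb)]
    by_cases h2 : b' = b
    · subst h2
      rw [if_pos rfl, if_pos ⟨rfl, rfl⟩]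
    · rw [if_neg h2, if_neg (by tauto)]
  · rw [if_neg h1, if_neg (by tauto)]

-- A's inner loop over j, truncated to range k: it fills the bottom k cells of column i
theorem pvInnerFold {r i : Nat} (hi : i < r) (v : Nat → String) :
    ∀ k, k ≤ r → ∀ nm, pvShape r nm →
      pvShape r ((List.range k).foldl (fun nm j => pvSetCell nm (r - 1 - j) i (v j)) nm) ∧
      ∀ a b, pvCell ((List.range k).foldl (fun nm j => pvSetCell nm (r - 1 - j) i (v j)) nm) a b =
        if a < r ∧ b = i ∧ r - k ≤ a then v (r - 1 - a) else pvCell nm a b := by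
  intro k
  induction k with
  | zero =>
    intro _ nm hnm
    simp only [List.range_zero, List.foldl_nil]
    refine ⟨hnm, fun a b => ?_⟩
    rw [if_neg (by omega)]
  | succ k ih =>
    intro hk nm hnm
    obtain ⟨ihs, ihc⟩ := ih (by omega) nm hnm
    rw [List.range_succ, List.foldl_append, List.foldl_cons, List.foldl_nil]
    refine ⟨pvShape_set ihs (by omega) _, fun a b => ?_⟩
    rw [pvCell_set ihs (by omega) hi _ a b, ihc a b]
    by_cases h1 : a = r - 1 - k ∧ b = i
    · rw [if_pos h1, if_pos (by omega)]
      obtain ⟨h1a, _⟩ := h1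
      subst h1a
      congr 1
      omega
    · rw [if_neg h1]
      by_cases h2 : a < r ∧ b = i ∧ r - k ≤ a
      · rw [if_pos h2, if_pos (by omega)]
      · rw [if_neg h2, if_neg (by omega)]

-- A's outer loop over i, truncated to range k: it fills the first k columns
theorem pvOuterFold {r : Nat} (v : Nat → Nat → String) :
    ∀ k, k ≤ r → ∀ nm, pvShape r nm →
      pvShape r ((List.range k).foldl (fun nm i =>
          (List.range r).foldl (fun nm j => pvSetCell nm (r - 1 - j) i (v i j)) nm) nm) ∧
      ∀ a b, pvCell ((List.range k).foldl (fun nm i =>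
          (List.range r).foldl (fun nm j => pvSetCell nm (r - 1 - j) i (v i j)) nm) nm) a b =
        if a < r ∧ b < k then v b (r - 1 - a) else pvCell nm a b := by
  intro k
  induction k with
  | zero =>
    intro _ nm hnm
    simp only [List.range_zero, List.foldl_nil]
    refine ⟨hnm, fun a b => ?_⟩
    rw [if_neg (by omega)]
  | succ k ih =>
    intro hk nm hnm
    obtain ⟨ihs, ihc⟩ := ih (by omega) nm hnm
    rw [List.range_succ, List.foldl_append, List.foldl_cons, List.foldl_nil]
    obtain ⟨hs, hc⟩ := pvInnerFold (r := r) (i := k) (by omega) (v k) r (le_refl r) _ ihs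
    refine ⟨hs, fun a b => ?_⟩
    rw [hc a b, ihc a b]
    by_cases h1 : a < r ∧ b = k ∧ r - r ≤ a
    · obtain ⟨h1a, h1b, h1c⟩ := h1
      subst h1b
      rw [if_pos ⟨h1a, rfl, h1c⟩, if_pos ⟨h1a, by omega⟩]
    · rw [if_neg h1]
      by_cases h2 : a < r ∧ b < k
      · rw [if_pos h2, if_pos (by omega)]
      · rw [if_neg h2, if_neg (by omega)]

theorem pvShape_replicate (r : Nat) : pvShape r (List.replicate r (List.replicate r "*")) := by
  refine ⟨by simp, fun row hrow => ?_⟩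
  rw [List.eq_of_mem_replicate hrow]
  simp

theorem pvRotSpec_shape {r : Nat} {m : List (List String)} (h : pvShape r m) :
    pvShape r (pvRotSpec m) := by
  obtain ⟨hlen, _⟩ := h
  refine ⟨by simp [pvRotSpec, hlen], fun row hrow => ?_⟩
  simp only [pvRotSpec, List.mem_map] at hrow
  obtain ⟨a, _, ha⟩ := hrow
  rw [← ha]
  simp [hlen]

theorem pvRange_map_getD {α : Type} [Inhabited α] (n i : Nat) (f : Nat → α) (h : i < n) :
    ((List.range n).map f).getD i default = f i := by
  rw [List.getD_eq_getElem _ _ (by simpa using h)]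
  simp

theorem pvRotSpec_cell {r : Nat} {m : List (List String)} (h : pvShape r m)
    {a : Nat} (ha : a < r) (b : Nat) :
    pvCell (pvRotSpec m) a b = pvCell m b (r - 1 - a) := by
  obtain ⟨hlen, _⟩ := h
  unfold pvCell pvRotSpec
  rw [hlen, show ((List.range r).map (fun a => m.map (fun row => row.getD (r - 1 - a) ""))).getD a []
        = m.map (fun row => row.getD (r - 1 - a) "") from pvRange_map_getD r a _ ha]
  by_cases hb : b < r
  · rw [List.getD_eq_getElem _ _ (by simp [hlen]; omega),
        List.getD_eq_getElem (l := m) _ (by omega)]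
    simp
  · rw [List.getD_eq_default _ _ (by simp [hlen]; omega),
        List.getD_eq_default (l := m) _ (by omega)]
    rfl

-- shape-based extensionality through pvCell
theorem pvExt_of_cell {r : Nat} {x y : List (List String)} (hx : pvShape r x) (hy : pvShape r y)
    (h : ∀ a b, a < r → b < r → pvCell x a b = pvCell y a b) : x = y := by
  obtain ⟨hx1, hx2⟩ := hx
  obtain ⟨hy1, hy2⟩ := hy
  apply List.ext_getElem (by omega)
  intro a ha ha'
  have hxa : x[a].length = r := hx2 _ (List.getElem_mem ha)
  have hya : y[a].length = r := hy2 _ (List.getElem_mem ha')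
  apply List.ext_getElem (by omega)
  intro b hb hb'
  have hcell := h a b (by omega) (by omega)
  unfold pvCell at hcell
  rw [List.getD_eq_getElem x _ (by omega), List.getD_eq_getElem y _ (by omega)] at hcell
  rw [List.getD_eq_getElem _ _ (by omega), List.getD_eq_getElem _ _ (by omega)] at hcell
  exact hcell

-- A's loop body equals the rotation description on square matrices
theorem pvRotA_eq_spec {m : List (List String)} (hm : pvShape m.length m) :
    pvRotA m m.length = pvRotSpec m := by
  obtain ⟨hs, hc⟩ := pvOuterFold (r := m.length)
    (fun i j => pvCell m i j) m.length (le_refl _) _ (pvShape_replicate m.length)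
  refine pvExt_of_cell ?_ (pvRotSpec_shape hm) ?_
  · unfold pvRotA
    simpa [pvCell, PySem.List.pyGetD_natCast] using hs
  · intro a b ha hb
    have h1 : pvCell (pvRotA m m.length) a b = pvCell m b (m.length - 1 - a) := by
      unfold pvRotA
      have := hc a b
      simpa [pvCell, PySem.List.pyGetD_natCast, ha, hb] using this
    rw [h1, pvRotSpec_cell hm ha b]

-- zip(*m) column description, for m with all rows of length r
theorem pvZipStar_char : ∀ (r : Nat) (m : List (List String)), m ≠ [] →
    (∀ row ∈ m, row.length = r) →
    pvZipStar m = (List.range r).map (fun j => m.map (fun row => row.getD j "")) := by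
  intro r
  induction r with
  | zero =>
    intro m hm hr
    rw [pvZipStar.eq_def, dif_pos]
    · simp
    · right
      obtain ⟨row, hrow⟩ := List.exists_mem_of_ne_nil m hm
      rw [List.any_eq_true]
      exact ⟨row, hrow, by simp [List.eq_nil_of_length_eq_zero (hr _ hrow)]⟩
  | succ r ih =>
    intro m hm hr
    rw [pvZipStar.eq_def, dif_neg]
    · have htails : ∀ row ∈ m.map (fun row => row.tail), row.length = r := by
        intro row hrow
        simp only [List.mem_map] at hrow
        obtain ⟨row0, hrow0, hrt⟩ := hrow
        rw [← hrt, List.length_tail, hr _ hrow0]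
        omega
      rw [ih (m.map (fun row => row.tail)) (by simpa using hm) htails]
      rw [List.range_succ_eq_map, List.map_cons, List.map_map]
      congr 1
      · refine List.map_congr_left (fun row _ => ?_)
        exact (pvGetD_zero row "").symm
      · refine List.map_congr_left (fun j _ => ?_)
        simp only [Function.comp, List.map_map]
        refine List.map_congr_left (fun row _ => ?_)
        simp only [Function.comp]
        rw [pvGetD_tail]
    · intro hcon
      rcases hcon with hc | hc
      · exact hm hc
      · obtain ⟨row, hrow, hemp⟩ := List.any_eq_true.mp hc
        have hlen := hr _ hrow
        rw [List.isEmpty_iff.mp hemp] at hlen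
        simp at hlen

theorem pvRevMapRange {α : Type} (n : Nat) (f : Nat → α) :
    ((List.range n).map f).reverse = (List.range n).map (fun a => f (n - 1 - a)) := by
  apply List.ext_getElem (by simp)
  intro a h1 h2
  simp [List.getElem_reverse]

-- B's loop body equals the rotation description on square matrices
theorem pvRotB_eq_spec {m : List (List String)} (hm : pvShape m.length m) :
    (pvZipStar m).reverse = pvRotSpec m := by
  by_cases h0 : m = []
  · subst h0
    rw [pvZipStar.eq_def, dif_pos (Or.inl rfl)]
    rfl
  · rw [pvZipStar_char m.length m h0 hm.2, pvRevMapRange]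
    rfl

theorem pvRotSpec_pow4 {r : Nat} {m : List (List String)} (hm : pvShape r m) :
    pvRotSpec (pvRotSpec (pvRotSpec (pvRotSpec m))) = m := by
  have h1 := pvRotSpec_shape hm
  have h2 := pvRotSpec_shape h1
  have h3 := pvRotSpec_shape h2
  have h4 := pvRotSpec_shape h3
  refine pvExt_of_cell h4 hm (fun a b ha hb => ?_)
  rw [pvRotSpec_cell h3 ha, pvRotSpec_cell h2 (by omega), pvRotSpec_cell h1 (by omega),
      pvRotSpec_cell hm (by omega)]
  congr 1 <;> omega

theorem pvRotSpec_iter_mod {r : Nat} : ∀ (n : Nat) (m : List (List String)), pvShape r m →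
    pvRotSpec^[n] m = pvRotSpec^[n % 4] m := by
  intro n
  induction n using Nat.strong_induction_on with
  | _ n ih =>
    intro m hm
    by_cases h : n < 4
    · rw [Nat.mod_eq_of_lt h]
    · have hn : n = (n - 4) + 4 := by omega
      rw [hn, Function.iterate_add_apply]
      have h4 : pvRotSpec^[4] m = m := pvRotSpec_pow4 (r := r) hm
      rw [h4, ih (n - 4) (by omega) m hm, show ((n - 4) + 4) % 4 = (n - 4) % 4 by omega]

theorem pvRotA_iter {r : Nat} : ∀ (n : Nat) (m : List (List String)), pvShape r m →
    (fun m => pvRotA m r)^[n] m = pvRotSpec^[n] m := by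
  intro n
  induction n with
  | zero => intro m _; rfl
  | succ n ih =>
    intro m hm
    rw [Function.iterate_succ_apply, Function.iterate_succ_apply]
    have hlen : m.length = r := hm.1
    have : pvRotA m r = pvRotSpec m := by rw [← hlen]; exact pvRotA_eq_spec (hlen ▸ hm)
    simp only [this]
    exact ih _ (pvRotSpec_shape hm)

theorem pvRotB_iter {r : Nat} : ∀ (n : Nat) (m : List (List String)), pvShape r m →
    (fun m => (pvZipStar m).reverse)^[n] m = pvRotSpec^[n] m := by
  intro n
  induction n with
  | zero => intro m _; rfl
  | succ n ih =>
    intro m hm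
    rw [Function.iterate_succ_apply, Function.iterate_succ_apply]
    have hlen : m.length = r := hm.1
    have : (pvZipStar m).reverse = pvRotSpec m := pvRotB_eq_spec (hlen ▸ hm)
    simp only [this]
    exact ih _ (pvRotSpec_shape hm)

-- ===== VERDICT (by name: the statement is the Claim_ definition above) =====
theorem rotate_matrix_left_spec : Claim_equal_rotate_matrix_left := by
  intro matrix_l times _ hpre
  show rotate_matrix_left matrix_l times = rotate_matrix_left_alt matrix_l times
  by_cases ht : times ≤ 0
  · unfold rotate_matrix_left rotate_matrix_left_alt
    rw [if_pos ht, PySem.List.pyRange_one_eq_nil ht, List.foldl_nil]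
  · have hsq : ∀ row ∈ matrix_l, row.length = matrix_l.length := by
      rcases hpre with h | h
      · omega
      · exact h
    have hshape : pvShape matrix_l.length matrix_l := ⟨rfl, hsq⟩
    have hpos : 0 < times := by omega
    unfold rotate_matrix_left rotate_matrix_left_alt
    rw [if_neg ht, List.foldl_const, List.foldl_const,
        PySem.List.length_pyRange_one, PySem.List.length_pyRange_one]
    rw [pvRotA_iter _ _ hshape, pvRotB_iter _ _ hshape]
    have hmod : PySem.Int.mod times 4 = times % 4 := PySem.Int.mod_eq_emod_of_pos (by omega)
    have hk : ((PySem.Int.mod times 4 - 0).toNat) = (times - 0).toNat % 4 := by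
      rw [hmod]
      omega
    rw [hk, pvRotSpec_iter_mod _ _ hshape]
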